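-- pv_equiv track=rewrite | github.com/bxparks/rpn83p | tools/compileunit.py | explode_str
-- ===== SOURCE A (Python) =====
-- from typing import List
--
-- def explode_str(s: str) -> List[str]:
--     i = 0
--     chars: List[str] = []
--     while i < len(s):
--         c = s[i]
--         if (c >= 'a' and c <= 'z') or (c >= 'A' and c <= 'Z') or \
--                 (c >= '0' and c <= '9'):
--             chars.append(f"'{c}'")
--         elif c == '<':
--             j = s.find('>', i)
--             if j < 0:
--                 raise ValueError(f"Missing '>' in string '{s}'")
--             fonttag = s[i + 1:j]  # extract word inside <...>
--             if not fonttag: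
--                 raise ValueError(f"Empty <> in string '{s}'")
--             chars.append(fonttag)
--             i = j
--         else:
--             raise ValueError(f"Unsupported character '{c}'")
--         i += 1
--     return chars
-- ===== SOURCE B (Python) =====
-- from typing import List
--
-- def explode_str(s: str) -> List[str]:
--     chars: List[str] = []
--     in_tag = False
--     buf = ""
--     for c in s:
--         if in_tag:
--             if c == '>':
--                 if not buf:
--                     raise ValueError(f"Empty <> in string '{s}'")
--                 chars.append(buf)
--                 in_tag = False
--                 buf = ""
--             else:
--                 buf += c
--         elif ('a' <= c <= 'z') or ('A' <= c <= 'Z') or ('0' <= c <= '9'):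
--             chars.append(f"'{c}'")
--         elif c == '<':
--             in_tag = True
--         else:
--             raise ValueError(f"Unsupported character '{c}'")
--     if in_tag:
--         raise ValueError(f"Missing '>' in string '{s}'")
--     return chars
-- ===== Notes on version B (the rewrite author's own statement) =====
-- stated objective: faster
-- what changed: Replaces the index-based while loop with find() calls and slicing by a single one-pass character state machine (in_tag flag plus a tag buffer), with no indexing, substring search or slicing.
import Mathlib
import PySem

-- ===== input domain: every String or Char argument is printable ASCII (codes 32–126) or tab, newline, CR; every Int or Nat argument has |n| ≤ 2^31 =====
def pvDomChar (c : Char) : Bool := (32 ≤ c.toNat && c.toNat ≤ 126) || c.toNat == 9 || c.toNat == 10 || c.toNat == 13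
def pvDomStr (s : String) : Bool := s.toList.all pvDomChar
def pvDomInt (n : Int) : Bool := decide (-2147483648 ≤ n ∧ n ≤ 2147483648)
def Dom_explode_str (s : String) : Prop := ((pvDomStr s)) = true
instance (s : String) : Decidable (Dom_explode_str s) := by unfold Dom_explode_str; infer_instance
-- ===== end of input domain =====

-- B replaces A's index loop with find() and slicing by a one-pass character state machine (in_tag flag + tag buffer).

-- ===== PORT A =====
-- [a-zA-Z0-9]: exactly A's three range tests
def pvIsAlnum (c : Char) : Bool :=
  (decide ('a' ≤ c) && decide (c ≤ 'z')) || (decide ('A' ≤ c) && decide (c ≤ 'Z')) ||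
  (decide ('0' ≤ c) && decide (c ≤ '9'))

-- s.find('>', i): first index ≥ i holding '>'; none = Python's -1 (A raises there, outside Pre_)
def pvFindGt (cs : List Char) (i : Nat) : Option Nat :=
  ((cs.drop i).findIdx? (· == '>')).map (i + ·)

-- used by explodeALoop's decreasing_by
theorem pvFindGt_ge (cs : List Char) (i j : Nat) (h : pvFindGt cs i = some j) : i ≤ j := by
  unfold pvFindGt at h
  cases hk : (cs.drop i).findIdx? (· == '>') with
  | none => simp [hk] at h
  | some k => simp [hk] at h; omega

-- A's while loop; on A's two raise paths inside the loop (no '>' found / empty tag),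
-- both outside Pre_, the port returns the accumulator.
def explodeALoop (cs : List Char) (i : Nat) (acc : List String) : List String :=
  if h : i < cs.length then
    let c := cs[i]
    if pvIsAlnum c then
      explodeALoop cs (i + 1) (acc ++ [String.ofList ['\'', c, '\'']])
    else if c = '<' then
      match hj : pvFindGt cs i with
      | none => acc
      | some j =>
        let fonttag := cs.extract (i + 1) j
        if fonttag.isEmpty then acc
        else explodeALoop cs (j + 1) (acc ++ [String.ofList fonttag])
    else acc
  else acc
termination_by cs.length - i
decreasing_by
  · omega
  · have := pvFindGt_ge cs i j hj; omega

def explode_str (s : String) : List String := explodeALoop s.toList 0 []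

-- ===== PORT B =====
-- Source B's for-loop; state = (in_tag, buf); B's raise paths (outside Pre_) return the accumulator
def explodeBLoop : List Char → Bool → List Char → List String → List String
  | [], _, _, acc => acc
  | c :: rest, true, buf, acc =>
      if c = '>' then
        if buf.isEmpty then acc
        else explodeBLoop rest false [] (acc ++ [String.ofList buf])
      else explodeBLoop rest true (buf ++ [c]) acc
  | c :: rest, false, buf, acc =>
      if pvIsAlnum c then explodeBLoop rest false buf (acc ++ [String.ofList ['\'', c, '\'']])
      else if c = '<' then explodeBLoop rest true [] acc
      else acc

def explode_str_alt (s : String) : List String := explodeBLoop s.toList false [] []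

-- ===== PRECONDITION & SPEC =====
-- Pre_ excludes exactly the inputs on which A raises ValueError (an unsupported character,
-- a '<' with no closing '>', or an empty '<>'): a well-formedness grammar of the input.
-- well-formedness grammar: a sequence of alphanumerics and '<'-groups whose tag
-- (everything up to the first '>') is nonempty
mutual
def pvOkChars : List Char → Bool
  | [] => true
  | c :: rest =>
      if pvIsAlnum c then pvOkChars rest
      else if c = '<' then pvOkTag rest false
      else false
def pvOkTag : List Char → Bool → Bool
  | [], _ => false
  | c :: rest, seen =>
      if c = '>' then seen && pvOkChars rest
      else pvOkTag rest true
end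

def Pre_explode_str (s : String) : Prop := pvOkChars s.toList = true
instance (s : String) : Decidable (Pre_explode_str s) := by unfold Pre_explode_str; infer_instance

def pvWitness_explode_str : String := "a<xy>9"

def Spec_explode_str (s : String) (out : List String) : Prop := out = explode_str_alt s
instance (s : String) (out : List String) : Decidable (Spec_explode_str s out) := by unfold Spec_explode_str; infer_instance

-- ===== CLAIM (what is proved, stated in full; the proofs are below) =====
def Claim_equal_explode_str : Prop := ∀ (s : String), Dom_explode_str s → Pre_explode_str s → Spec_explode_str s (explode_str s)

-- ===== LEMMAS AND PROOFS =====

-- B's in-tag mode buffers everything up to the first '>' and flushes the buffer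
theorem explodeBLoop_tag (rest : List Char) :
    ∀ (k : Nat) (buf : List Char) (acc : List String),
    rest.findIdx? (· == '>') = some k → (buf ++ rest.take k) ≠ [] →
    explodeBLoop rest true buf acc
      = explodeBLoop (rest.drop (k + 1)) false [] (acc ++ [String.ofList (buf ++ rest.take k)]) := by
  induction rest with
  | nil => intro k buf acc h; rw [List.findIdx?_nil] at h; exact absurd h (by simp)
  | cons c rs ih =>
    intro k buf acc h hne
    by_cases hc : c = '>'
    · subst hc
      rw [List.findIdx?_cons] at h
      simp at h
      subst h
      simp only [List.take_zero, List.append_nil] at hne ⊢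
      simp [explodeBLoop, List.isEmpty_iff, hne]
    · rw [List.findIdx?_cons] at h
      simp [hc] at h
      obtain ⟨k', hk', rfl⟩ := h
      have hne' : (buf ++ [c]) ++ rs.take k' ≠ [] := by simp
      have := ih k' (buf ++ [c]) acc hk' hne'
      simp only [explodeBLoop, if_neg hc]
      rw [this]
      simp

-- the grammar's tag mode finds a first '>' at a positive index (unless a char was already seen)
theorem pvOkTag_spec : ∀ (rest : List Char) (seen : Bool), pvOkTag rest seen = true →
    ∃ k, rest.findIdx? (· == '>') = some k ∧ (seen = true ∨ 1 ≤ k) ∧ pvOkChars (rest.drop (k + 1)) = true := by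
  intro rest
  induction rest with
  | nil => intro seen h; simp [pvOkTag] at h
  | cons c rs ih =>
    intro seen h
    by_cases hc : c = '>'
    · subst hc
      simp [pvOkTag] at h
      exact ⟨0, by rw [List.findIdx?_cons]; simp, Or.inl h.1, by simpa using h.2⟩
    · rw [pvOkTag, if_neg hc] at h
      obtain ⟨k, hk, _, hok⟩ := ih true h
      refine ⟨k + 1, ?_, Or.inr (by omega), by simpa using hok⟩
      rw [List.findIdx?_cons, if_neg (by simpa using hc), hk]
      rfl

theorem explodeALoop_eq (cs : List Char) : ∀ (i : Nat) (acc : List String),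
    pvOkChars (cs.drop i) = true →
    explodeALoop cs i acc = explodeBLoop (cs.drop i) false [] acc := by
  intro i acc
  induction i, acc using explodeALoop.induct (cs := cs) with
  | case1 i acc h c halnum ih =>
    intro hok
    have halnum' : pvIsAlnum cs[i] = true := halnum
    have hd : cs.drop i = cs[i] :: cs.drop (i + 1) := List.drop_eq_getElem_cons h
    rw [hd] at hok
    simp only [pvOkChars, halnum', if_true] at hok
    rw [explodeALoop]
    simp only [dif_pos h, halnum', if_true]
    rw [hd]
    simp only [explodeBLoop, halnum', if_true]
    exact ih hok
  | case2 i acc h c halnum hlt hj =>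
    intro hok
    exfalso
    have halnum' : ¬ pvIsAlnum cs[i] = true := halnum
    have hlt' : cs[i] = '<' := hlt
    have hj' : pvFindGt cs i = none := hj
    have hd : cs.drop i = cs[i] :: cs.drop (i + 1) := List.drop_eq_getElem_cons h
    unfold pvFindGt at hj'
    rw [hd, hlt', List.findIdx?_cons] at hj'
    simp at hj'
    have hnone : List.findIdx? (fun x => x == '>') (List.drop (i + 1) cs) = none := by
      rw [List.findIdx?_eq_none_iff]; simpa using hj'
    rw [hd, hlt'] at hok
    rw [pvOkChars, if_neg (by decide), if_pos rfl] at hok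
    obtain ⟨k0, hk0, _, _⟩ := pvOkTag_spec _ _ hok
    rw [hnone] at hk0
    exact absurd hk0 (by simp)
  | case3 i acc h c halnum hlt j hj fonttag hemp =>
    intro hok
    exfalso
    have halnum' : ¬ pvIsAlnum cs[i] = true := halnum
    have hlt' : cs[i] = '<' := hlt
    have hj' : pvFindGt cs i = some j := hj
    have hemp' : (cs.extract (i + 1) j).isEmpty = true := hemp
    have hd : cs.drop i = cs[i] :: cs.drop (i + 1) := List.drop_eq_getElem_cons h
    unfold pvFindGt at hj'
    rw [hd, hlt', List.findIdx?_cons] at hj'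
    simp at hj'
    obtain ⟨k', hk', rfl⟩ := hj'
    rw [hd, hlt'] at hok
    rw [pvOkChars, if_neg (by decide), if_pos rfl] at hok
    obtain ⟨k0, hk0, hseen, hok2⟩ := pvOkTag_spec _ _ hok
    rw [hk'] at hk0
    obtain rfl : k' = k0 := Option.some.inj hk0
    have hk1 : 1 ≤ k' := by
      rcases hseen with h0 | h0
      · simp at h0
      · exact h0
    have hext : cs.extract (i + 1) (i + (k' + 1)) = (cs.drop (i + 1)).take k' := by
      rw [List.extract_eq_take_drop]; congr 1; omega
    rw [hext, List.isEmpty_iff, List.take_eq_nil_iff] at hemp'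
    have hlen : k' < (cs.drop (i + 1)).length := by
      rw [List.findIdx?_eq_some_iff_findIdx_eq] at hk'; exact hk'.1
    rcases hemp' with h0 | h0
    · omega
    · rw [h0] at hlen; simp at hlen
  | case4 i acc h c halnum hlt j hj fonttag hemp ih =>
    intro hok
    have halnum' : ¬ pvIsAlnum cs[i] = true := halnum
    have hlt' : cs[i] = '<' := hlt
    have hj' : pvFindGt cs i = some j := hj
    have hemp' : ¬ (cs.extract (i + 1) j).isEmpty = true := hemp
    have hd : cs.drop i = cs[i] :: cs.drop (i + 1) := List.drop_eq_getElem_cons h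
    have hjc := hj'
    unfold pvFindGt at hjc
    rw [hd, hlt', List.findIdx?_cons] at hjc
    simp at hjc
    obtain ⟨k', hk', rfl⟩ := hjc
    rw [hd, hlt'] at hok
    rw [pvOkChars, if_neg (by decide), if_pos rfl] at hok
    obtain ⟨k0, hk0, hseen, hok'⟩ := pvOkTag_spec _ _ hok
    rw [hk'] at hk0
    obtain rfl : k' = k0 := Option.some.inj hk0
    have hk1 : 1 ≤ k' := by
      rcases hseen with h0 | h0
      · simp at h0
      · exact h0
    have hext : cs.extract (i + 1) (i + (k' + 1)) = (cs.drop (i + 1)).take k' := by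
      rw [List.extract_eq_take_drop]; congr 1; omega
    have hdrop : cs.drop (i + (k' + 1) + 1) = (cs.drop (i + 1)).drop (k' + 1) := by
      rw [List.drop_drop]; congr 1; omega
    -- A side
    rw [explodeALoop]
    simp only [dif_pos h, hlt']
    rw [if_neg (show ¬ pvIsAlnum '<' = true by decide)]
    simp only [if_true]
    have hemp'' : ¬ (cs.extract (i + 1) (i + (k' + 1))).isEmpty = true := hemp'
    have hlen : k' < (cs.drop (i + 1)).length := by
      rw [List.findIdx?_eq_some_iff_findIdx_eq] at hk'; exact hk'.1
    have hne : (([] : List Char) ++ (cs.drop (i + 1)).take k') ≠ [] := by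
      simp only [List.nil_append]
      rw [Ne, List.take_eq_nil_iff]
      rintro (h0 | h0)
      · omega
      · rw [h0] at hlen; simp at hlen
    split
    next heq => rw [hj'] at heq; exact absurd heq (by simp)
    next j2 heq =>
      rw [hj'] at heq
      obtain rfl : i + (k' + 1) = j2 := Option.some.inj heq
      rw [if_neg hemp'']
      -- B side
      rw [hd, hlt']
      simp only [explodeBLoop]
      rw [if_neg (show ¬ pvIsAlnum '<' = true by decide)]
      simp only [if_true]
      rw [explodeBLoop_tag _ k' [] acc hk' hne]
      simp only [List.nil_append]
      have hih : explodeALoop cs (i + (k' + 1) + 1) (acc ++ [String.ofList (cs.extract (i + 1) (i + (k' + 1)))])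
          = explodeBLoop (cs.drop (i + (k' + 1) + 1)) false [] (acc ++ [String.ofList (cs.extract (i + 1) (i + (k' + 1)))]) :=
        ih (by rw [hdrop]; exact hok')
      rw [hext, hdrop] at hih
      rw [hext]
      exact hih
  | case5 i acc h c halnum hlt =>
    intro hok
    exfalso
    have halnum' : ¬ pvIsAlnum cs[i] = true := halnum
    have hlt' : ¬ cs[i] = '<' := hlt
    have hd : cs.drop i = cs[i] :: cs.drop (i + 1) := List.drop_eq_getElem_cons h
    rw [hd] at hok
    rw [pvOkChars, if_neg halnum', if_neg hlt'] at hok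
    simp at hok
  | case6 i acc h =>
    intro _
    have hd : cs.drop i = [] := List.drop_eq_nil_of_le (by omega)
    rw [explodeALoop]
    simp only [dif_neg h]
    rw [hd]
    rfl

-- ===== VERDICT (by name: the statement is the Claim_ definition above) =====
theorem explode_str_spec : Claim_equal_explode_str := by
  intro s _ hpre
  unfold Spec_explode_str explode_str explode_str_alt
  simpa using explodeALoop_eq s.toList 0 [] (by simpa using hpre)
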